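-- pv_equiv track=rewrite | github.com/wjddn3711/BOJ-daily | containers_of_ball.py | organizingContainers
-- ===== SOURCE A (Python) =====
-- def organizingContainers(container):
--     # Write your code here
--     n = len(container)
--     balls_count = [0] * n
--     container_count = [0] * n
--
--     for i in range(n):
--         for j in range(n):
--             balls_count[j] += container[i][j]
--             container_count[i] += container[i][j]
--
--     if sorted(balls_count) == sorted(container_count):
--         return "possible"
--     return "impossible"
-- ===== SOURCE B (Python) =====
-- def organizingContainers(container):
--     n = len(container)
--     counts = {}
--     for i in range(n):
--         t = 0
--         for j in range(n):
--             t += container[i][j]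
--         counts[t] = counts.get(t, 0) + 1
--     for j in range(n):
--         c = 0
--         for i in range(n):
--             c += container[i][j]
--         counts[c] = counts.get(c, 0) - 1
--     return "possible" if all(v == 0 for v in counts.values()) else "impossible"
-- ===== Notes on version B (the rewrite author's own statement) =====
-- stated objective: alternative
-- what changed: Drops the sort-and-compare over two mutated counter arrays: B makes one staged pass per aggregate over the n-by-n matrix, tallies the row totals in a hash counter, decrements it by each column total, and answers by checking the counter is all-zero -- multiset equality by hashing, no sorting; Pre_ excludes only the inputs where both programs raise IndexError (a row shorter than the container list).
import Mathlib
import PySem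

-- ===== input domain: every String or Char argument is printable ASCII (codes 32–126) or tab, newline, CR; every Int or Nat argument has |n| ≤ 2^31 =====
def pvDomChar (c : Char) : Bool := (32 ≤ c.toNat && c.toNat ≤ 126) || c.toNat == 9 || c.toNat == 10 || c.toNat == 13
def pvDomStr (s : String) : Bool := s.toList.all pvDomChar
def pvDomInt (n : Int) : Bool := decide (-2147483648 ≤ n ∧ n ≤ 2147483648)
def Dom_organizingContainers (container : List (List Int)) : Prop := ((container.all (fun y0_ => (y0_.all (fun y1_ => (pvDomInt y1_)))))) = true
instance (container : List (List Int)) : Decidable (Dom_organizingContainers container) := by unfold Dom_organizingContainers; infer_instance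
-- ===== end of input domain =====

-- B drops A's sort-and-compare: it tallies row totals of the n-by-n matrix into a hash counter, decrements it by each column total, and answers by checking the counter is all-zero (multiset equality by hashing, no sorting); equal return values on every input Python A accepts (Pre_).


-- ===== PORT A =====
def organizingContainers (container : List (List Int)) : String :=
  let n := container.length
  let ballsCount := List.replicate n (0 : Int)
  let containerCount := List.replicate n (0 : Int)
  let st := (PySem.List.pyRange 0 (n : Int)).foldl (fun (st : List Int × List Int) i =>
      (PySem.List.pyRange 0 (n : Int)).foldl (fun (st : List Int × List Int) j =>
        (PySem.List.pySetD st.1 j (PySem.List.pyGetD st.1 j 0 + PySem.List.pyGetD (PySem.List.pyGetD container i []) j 0),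
         PySem.List.pySetD st.2 i (PySem.List.pyGetD st.2 i 0 + PySem.List.pyGetD (PySem.List.pyGetD container i []) j 0))) st)
    (ballsCount, containerCount)
  if PySem.List.sorted st.1 (fun x => x) = PySem.List.sorted st.2 (fun x => x) then "possible" else "impossible"

-- ===== PORT B =====
def organizingContainers_alt (container : List (List Int)) : String :=
  let n := container.length
  let counts := (PySem.List.pyRange 0 (n : Int)).foldl
    (fun (d : PySem.Dict Int Int) i =>
      let t := (PySem.List.pyRange 0 (n : Int)).foldl
        (fun t j => t + PySem.List.pyGetD (PySem.List.pyGetD container i []) j 0) 0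
      d.insert t (d.getD t 0 + 1)) PySem.Dict.empty
  let counts2 := (PySem.List.pyRange 0 (n : Int)).foldl
    (fun (d : PySem.Dict Int Int) j =>
      let c := (PySem.List.pyRange 0 (n : Int)).foldl
        (fun c i => c + PySem.List.pyGetD (PySem.List.pyGetD container i []) j 0) 0
      d.insert c (d.getD c 0 - 1)) counts
  if counts2.values.all (fun v => v == 0) then "possible" else "impossible"

-- ===== PRECONDITION & SPEC =====
-- Pre_ admits exactly the inputs on which the Python A returns: every row must have at
-- least len(container) entries, else container[i][j] raises IndexError (B raises there too).
def Pre_organizingContainers (container : List (List Int)) : Prop :=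
  ∀ row ∈ container, container.length ≤ row.length
instance (container : List (List Int)) : Decidable (Pre_organizingContainers container) := by
  unfold Pre_organizingContainers; infer_instance
def pvWitness_organizingContainers : List (List Int) := [[1, 2], [3, 4]]

def Spec_organizingContainers (container : List (List Int)) (out : String) : Prop :=
  out = organizingContainers_alt container
instance (container : List (List Int)) (out : String) : Decidable (Spec_organizingContainers container out) := by
  unfold Spec_organizingContainers; infer_instance

-- ===== CLAIM (what is proved, stated in full; the proofs are below) =====
def Claim_equal_organizingContainers : Prop := ∀ (container : List (List Int)), Dom_organizingContainers container → Pre_organizingContainers container → Spec_organizingContainers container (organizingContainers container)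

-- ===== LEMMAS AND PROOFS =====

-- ---------- A-side loop collapse ----------

-- accumulate at a fixed index (initial value explicit)
lemma foldl_set_fixed (l : List Nat) (c : List Int) (i : Nat) (v : Int) (f : Nat → Int)
    (hi : i < c.length) :
    l.foldl (fun c j => c.set i (c.getD i 0 + f j)) (c.set i v)
      = c.set i (v + (l.map f).sum) := by
  induction l generalizing v with
  | nil => simp
  | cons j l ih =>
    simp only [List.foldl_cons]
    have hgd : (c.set i v).getD i 0 = v := by
      rw [List.getD_eq_getElem _ _ (by simpa using hi)]
      simp [List.getElem_set_self]
    rw [hgd, List.set_set, ih (v + f j)]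
    simp [add_assoc]

-- accumulate at a fixed index
lemma foldl_set_fixed' (l : List Nat) (c : List Int) (i : Nat) (f : Nat → Int)
    (hi : i < c.length) :
    l.foldl (fun c j => c.set i (c.getD i 0 + f j)) c
      = c.set i (c.getD i 0 + (l.map f).sum) := by
  have h0 : c = c.set i (c.getD i 0) := by
    rw [List.getD_eq_getElem _ _ hi, List.set_getElem_self]
  calc l.foldl (fun c j => c.set i (c.getD i 0 + f j)) c
      = l.foldl (fun c j => c.set i (c.getD i 0 + f j)) (c.set i (c.getD i 0)) := by rw [← h0]
    _ = c.set i (c.getD i 0 + (l.map f).sum) := foldl_set_fixed l c i _ f hi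

-- distinct-index accumulation over range
lemma foldl_set_range (n : Nat) (b : List Int) (f : Nat → Int) :
    (List.range n).foldl (fun b j => b.set j (b.getD j 0 + f j)) b
      = b.mapIdx (fun j x => if j < n then x + f j else x) := by
  induction n with
  | zero =>
    simp only [List.range_zero, List.foldl_nil, Nat.not_lt_zero, if_false]
    apply List.ext_getElem <;> simp
  | succ n ih =>
    rw [List.range_succ, List.foldl_append, ih]
    simp only [List.foldl_cons, List.foldl_nil]
    apply List.ext_getElem
    · simp
    · intro k h1 h2
      have hk : k < b.length := by simpa using h2
      have hmlen : k < (List.mapIdx (fun j x => if j < n then x + f j else x) b).length := by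
        simpa using hk
      rw [List.getElem_set, List.getElem_mapIdx]
      by_cases hkn : n = k
      · subst hkn
        rw [if_pos rfl, List.getD_eq_getElem _ _ hmlen, List.getElem_mapIdx]
        simp
      · rw [if_neg hkn, List.getElem_mapIdx]
        by_cases h3 : k < n
        · have h4 : k < n + 1 := by omega
          simp [h3, h4]
        · have h4 : ¬ k < n + 1 := by omega
          simp [h3, h4]

-- iterated mapIdx-add accumulation
lemma foldl_mapIdx_add (n : Nat) (l : List Nat) (b : List Int) (g : Nat → Nat → Int) :
    l.foldl (fun b i => b.mapIdx (fun j x => if j < n then x + g i j else x)) b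
      = b.mapIdx (fun j x => if j < n then x + (l.map (fun i => g i j)).sum else x) := by
  induction l generalizing b with
  | nil =>
    apply List.ext_getElem
    · simp
    · intro k h1 h2
      rw [List.getElem_mapIdx]
      split_ifs <;> simp
  | cons i l ih =>
    simp only [List.foldl_cons]
    rw [ih, List.mapIdx_mapIdx]
    congr 1
    funext j x
    by_cases hj : j < n
    · simp [hj]
      ring
    · simp [hj]

lemma mapIdx_replicate (n : Nat) (f : Nat → Int) :
    (List.replicate n (0 : Int)).mapIdx (fun j x => if j < n then x + f j else x)
      = (List.range n).map (fun j => 0 + f j) := by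
  apply List.ext_getElem
  · simp
  · intro k h1 h2
    have hk : k < n := by simpa using h1
    rw [List.getElem_mapIdx]
    simp [hk]

-- splitting the nested loop state into its two independent components
lemma inner_split (container : List (List Int)) (n : Nat) (st : List Int × List Int) (i : Nat) :
    (List.range n).foldl (fun (st : List Int × List Int) j =>
        (st.1.set j (st.1.getD j 0 + (container.getD i []).getD j 0),
         st.2.set i (st.2.getD i 0 + (container.getD i []).getD j 0))) st
      = ((List.range n).foldl (fun b j => b.set j (b.getD j 0 + (container.getD i []).getD j 0)) st.1,
         (List.range n).foldl (fun c j => c.set i (c.getD i 0 + (container.getD i []).getD j 0)) st.2) := by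
  obtain ⟨a, b⟩ := st
  exact PySem.List.foldl_prod_mk
    (fun b j => b.set j (b.getD j 0 + (container.getD i []).getD j 0))
    (fun c j => c.set i (c.getD i 0 + (container.getD i []).getD j 0))
    (List.range n) a b

-- collapsing the inner loop of the container_count component
lemma outer_conts (l : List Nat) (inner : List Nat) (c : List Int) (f : Nat → Nat → Int)
    (hl : ∀ i ∈ l, i < c.length) :
    l.foldl (fun c i => inner.foldl (fun c j => c.set i (c.getD i 0 + f i j)) c) c
      = l.foldl (fun c i => c.set i (c.getD i 0 + (inner.map (f i)).sum)) c := by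
  induction l generalizing c with
  | nil => rfl
  | cons i l ih =>
    simp only [List.foldl_cons]
    have hi : i < c.length := hl i (by simp)
    rw [foldl_set_fixed' inner c i (f i) hi]
    exact ih _ (fun i' hi' => by
      simpa using hl i' (by simp [hi']))

-- A's branch condition, collapsed to the two aggregate lists
lemma A_norm (container : List (List Int)) :
    organizingContainers container
      = (if PySem.List.sorted ((List.range container.length).map (fun j =>
            ((List.range container.length).map
              (fun i => (container.getD i []).getD j 0)).sum)) (fun x => x)
           = PySem.List.sorted ((List.range container.length).map (fun i =>
            ((List.range container.length).map
              (fun j => (container.getD i []).getD j 0)).sum)) (fun x => x)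
         then "possible" else "impossible") := by
  unfold organizingContainers
  simp only [PySem.List.pyRange_one, Int.sub_zero, Int.toNat_natCast, zero_add,
    List.foldl_map, PySem.List.pyGetD_natCast, PySem.List.pySetD_natCast]
  simp only [inner_split]
  rw [PySem.List.foldl_prod_mk
    (fun (b : List Int) (i : Nat) => (List.range container.length).foldl
      (fun b j => b.set j (b.getD j 0 + (container.getD i []).getD j 0)) b)
    (fun (c : List Int) (i : Nat) => (List.range container.length).foldl
      (fun c j => c.set i (c.getD i 0 + (container.getD i []).getD j 0)) c)
    (List.range container.length)
    (List.replicate container.length 0) (List.replicate container.length 0)]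
  have h1 : (fun (b : List Int) (i : Nat) => (List.range container.length).foldl
        (fun b j => b.set j (b.getD j 0 + (container.getD i []).getD j 0)) b)
      = fun b i => b.mapIdx (fun j x =>
          if j < container.length then x + (container.getD i []).getD j 0 else x) := by
    funext b i
    exact foldl_set_range _ b _
  rw [h1, foldl_mapIdx_add, mapIdx_replicate]
  rw [outer_conts _ _ _ (fun i j => (container.getD i []).getD j 0)
      (by intro i hi; simpa using List.mem_range.mp hi)]
  rw [foldl_set_range, mapIdx_replicate]
  simp only [zero_add]

-- ---------- B-side loop collapse ----------

-- the decrement loop: lookup after the fold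
lemma getD_foldl_insert_sub_one (l : List Int) (d : PySem.Dict Int Int) (v : Int) :
    (l.foldl (fun d x => d.insert x (d.getD x 0 - 1)) d).getD v 0
      = d.getD v 0 - l.count v := by
  induction l generalizing d with
  | nil => simp
  | cons x xs ih =>
    rw [List.foldl_cons, ih, PySem.Dict.getD_insert, List.count_cons]
    by_cases hx : v = x
    · rw [if_pos hx]
      simp [hx]
      omega
    · rw [if_neg hx]
      have : ¬ (x = v) := fun h => hx h.symm
      simp [this]

-- sorted(xs) == sorted(ys) decided by decrementing Counter(ys) with xs and checking all-zero
lemma sorted_eq_iff_counter_dec (xs ys : List Int) :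
    (PySem.List.sorted xs (fun x => x) = PySem.List.sorted ys (fun x => x))
      ↔ ((xs.foldl (fun (d : PySem.Dict Int Int) x => d.insert x (d.getD x 0 - 1))
            (PySem.Dict.counter ys)).values.all (fun v => v == 0) = true) := by
  have hknd : (xs.foldl (fun (d : PySem.Dict Int Int) x => d.insert x (d.getD x 0 - 1))
      (PySem.Dict.counter ys)).keys.Nodup := by
    rw [PySem.Dict.keys_foldl_insert]
    exact PySem.Set.nodup_update _ _ (PySem.Dict.nodup_keys_counter _)
  have hdget : ∀ v : Int, (xs.foldl (fun (d : PySem.Dict Int Int) x => d.insert x (d.getD x 0 - 1))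
      (PySem.Dict.counter ys)).getD v 0 = (ys.count v : Int) - xs.count v := by
    intro v
    rw [getD_foldl_insert_sub_one, PySem.Dict.getD_counter]
  rw [PySem.List.sorted_id_eq_sorted_id_iff_perm, List.perm_iff_count,
    PySem.Dict.values_eq_map_keys _ hknd 0, List.all_eq_true]
  constructor
  · intro h p hp
    obtain ⟨v, hv, rfl⟩ := List.mem_map.mp hp
    rw [beq_iff_eq, hdget v]
    have := h v
    omega
  · intro h v
    by_cases hv : v ∈ (xs.foldl (fun (d : PySem.Dict Int Int) x => d.insert x (d.getD x 0 - 1))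
        (PySem.Dict.counter ys)).keys
    · have := h _ (List.mem_map.mpr ⟨v, hv, rfl⟩)
      rw [beq_iff_eq, hdget v] at this
      omega
    · have h1 : v ∉ ys := by
        intro hc
        exact hv (by
          rw [PySem.Dict.keys_foldl_insert]
          exact (PySem.Set.mem_update _ _ _).mpr (Or.inl (by
            rw [PySem.Dict.keys_counter]
            exact (PySem.Set.mem_ofList _ _).mpr hc)))
      have h2 : v ∉ xs := by
        intro hc
        exact hv (by
          rw [PySem.Dict.keys_foldl_insert]
          exact (PySem.Set.mem_update _ _ _).mpr (Or.inr hc))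
      rw [List.count_eq_zero_of_not_mem h2, List.count_eq_zero_of_not_mem h1]

-- B's branch condition, collapsed to the same two aggregate lists
lemma B_norm (container : List (List Int)) :
    organizingContainers_alt container
      = (if (((List.range container.length).map (fun j =>
              ((List.range container.length).map
                (fun i => (container.getD i []).getD j 0)).sum)).foldl
            (fun (d : PySem.Dict Int Int) x => d.insert x (d.getD x 0 - 1))
            (PySem.Dict.counter ((List.range container.length).map (fun i =>
              ((List.range container.length).map
                (fun j => (container.getD i []).getD j 0)).sum)))).values.all
              (fun v => v == 0)
         then "possible" else "impossible") := by
  unfold organizingContainers_alt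
  conv_lhs =>
    simp only [PySem.List.pyRange_one, Int.sub_zero, Int.toNat_natCast, zero_add,
      List.foldl_map, PySem.List.pyGetD_natCast, PySem.List.foldl_add]
  rw [← List.foldl_map (f := fun i => ((List.range container.length).map
        (fun j => (container.getD i []).getD j 0)).sum)
      (g := fun (d : PySem.Dict Int Int) x => d.insert x (d.getD x 0 + 1))]
  rw [← List.foldl_map (f := fun j => ((List.range container.length).map
        (fun i => (container.getD i []).getD j 0)).sum)
      (g := fun (d : PySem.Dict Int Int) x => d.insert x (d.getD x 0 - 1))]
  rfl

-- ===== VERDICT (by name: the statement is the Claim_ definition above) =====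
theorem organizingContainers_spec : Claim_equal_organizingContainers := by
  intro container _ _
  unfold Spec_organizingContainers
  rw [A_norm, B_norm]
  exact if_congr (sorted_eq_iff_counter_dec _ _) rfl rfl
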